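-- pv_equiv track=rewrite | github.com/DancingOnAir/LeetcodePythonSolution | greedy/3628_maximum_number_of_subsequences_after_one_inserting.py | maxInsertC
-- ===== SOURCE A (Python) =====
-- def maxInsertC(s: str) -> int:
--     cnt_t = s.count('T')
--     cnt_l = 0
--     res = 0
--     for c in s:
--         if c == 'T':
--             cnt_t -= 1
--         if c == 'L':
--             cnt_l += 1
--         res = max(res, cnt_l * cnt_t)
--     return res
-- ===== SOURCE B (Python) =====
-- def maxInsertC(s: str) -> int:
--     # positions of every 'T' and every 'L' (both ascending)
--     t_pos = [i for i, c in enumerate(s) if c == 'T']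
--     l_pos = [i for i, c in enumerate(s) if c == 'L']
--     best = 0
--     j = 0  # two-pointer into t_pos: t_pos[j:] are the T's not left of the current L
--     for rank, p in enumerate(l_pos, start=1):
--         while j < len(t_pos) and t_pos[j] < p:
--             j += 1
--         best = max(best, rank * (len(t_pos) - j))
--     return best
-- ===== Notes on version B (the rewrite author's own statement) =====
-- stated objective: alternative
-- what changed: Replaces the single streaming scan with two running counters by first extracting the occurrence-index lists of the prefix letter and the suffix letter, then a two-pointer merge that visits only the prefix-letter positions, consuming the sorted suffix-letter position list to count occurrences to the right of each one.
import Mathlib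
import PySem

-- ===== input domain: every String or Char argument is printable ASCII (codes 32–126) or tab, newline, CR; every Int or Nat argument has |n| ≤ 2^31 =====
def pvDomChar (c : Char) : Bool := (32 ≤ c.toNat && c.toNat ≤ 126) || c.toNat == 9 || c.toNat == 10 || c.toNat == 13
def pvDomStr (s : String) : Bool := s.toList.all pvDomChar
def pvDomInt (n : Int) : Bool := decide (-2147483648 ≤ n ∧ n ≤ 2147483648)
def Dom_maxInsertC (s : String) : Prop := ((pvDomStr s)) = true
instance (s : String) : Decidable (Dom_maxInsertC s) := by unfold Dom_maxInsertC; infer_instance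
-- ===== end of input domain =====

-- B replaces A's streaming two-counter scan by position index lists for 'L' and 'T'
-- plus a two-pointer merge over only the 'L' positions (alternative algorithm, same cost).

-- ===== PORT A =====
-- for c in s: decrement cnt_t on 'T', increment cnt_l on 'L', res = max(res, cnt_l*cnt_t)
def pvGoA : List Char → Int → Int → Int → Int
  | [], _, _, res => res
  | c :: tl, ct, cl, res =>
    let ct' := if c = 'T' then ct - 1 else ct
    let cl' := if c = 'L' then cl + 1 else cl
    pvGoA tl ct' cl' (max res (cl' * ct'))

def maxInsertC (s : String) : Int :=
  pvGoA s.toList ((PySem.Str.count s "T" : Nat) : Int) 0 0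

-- ===== PORT B =====
-- [i for i, c in enumerate(s) if c == ch]: indices where ch occurs, ascending
def pvPos (ch : Char) : List Char → Nat → List Nat
  | [], _ => []
  | c :: tl, i => if c = ch then i :: pvPos ch tl (i + 1) else pvPos ch tl (i + 1)

-- the while loop 'while j < len(t_pos) and t_pos[j] < p: j += 1':
-- the pointer j is represented by the remaining suffix t_pos[j:]
def pvAdvance : List Nat → Nat → List Nat
  | [], _ => []
  | q :: tl, p => if q < p then pvAdvance tl p else q :: tl

-- for rank, p in enumerate(l_pos, start=1): advance the pointer, best = max(best, rank * len(t_pos[j:]))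
def pvGoB : List Nat → List Nat → Nat → Int → Int
  | [], _, _, best => best
  | p :: ps, tp, rank, best =>
    let tp' := pvAdvance tp p
    pvGoB ps tp' (rank + 1) (max best ((rank : Int) * (tp'.length : Int)))

def maxInsertC_alt (s : String) : Int :=
  pvGoB (pvPos 'L' s.toList 0) (pvPos 'T' s.toList 0) 1 0

-- ===== PRECONDITION & SPEC =====
def Spec_maxInsertC (s : String) (out : Int) : Prop := out = maxInsertC_alt s
instance (s : String) (out : Int) : Decidable (Spec_maxInsertC s out) := by unfold Spec_maxInsertC; infer_instance

-- ===== CLAIM (what is proved, stated in full; the proofs are below) =====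
def Claim_equal_maxInsertC : Prop := ∀ (s : String), Dom_maxInsertC s → Spec_maxInsertC s (maxInsertC s)

-- ===== LEMMAS AND PROOFS =====

-- PySem's substring counter, for a single-character pattern, is List.count
theorem pv_count_go_singleton (ch : Char) :
    ∀ (l : List Char) (fuel acc : Nat), l.length ≤ fuel →
      PySem.Chars.count.go [ch] fuel l acc = acc + l.count ch := by
  intro l
  induction l with
  | nil => intro fuel acc _; cases fuel <;> simp [PySem.Chars.count.go]
  | cons c tl ih =>
    intro fuel acc h
    cases fuel with
    | zero => simp at h
    | succ f =>
      simp only [List.length_cons, Nat.succ_le_succ_iff] at h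
      by_cases hc : ch = c
      · subst hc
        have hpre : List.isPrefixOf [ch] (ch :: tl) = true := by
          simp [List.isPrefixOf]
        simp only [PySem.Chars.count.go, hpre, if_pos, List.length_cons,
          List.length_nil, List.drop_succ_cons, List.drop_zero]
        rw [ih f (acc + 1) h]
        simp only [List.count_cons, BEq.rfl, if_pos]
        omega
      · have hpre : List.isPrefixOf [ch] (c :: tl) = false := by
          simp [List.isPrefixOf, hc]
        simp only [PySem.Chars.count.go, hpre]
        rw [ih f acc h]
        simp [List.count_cons]
        exact fun h' => hc h'.symm

theorem pv_chars_count_singleton (ch : Char) (cs : List Char) :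
    PySem.Chars.count cs [ch] = cs.count ch := by
  simp only [PySem.Chars.count, List.isEmpty_cons]
  have := pv_count_go_singleton ch cs cs.length 0 (le_refl _)
  simpa using this

-- every index produced by pvPos starting at i is ≥ i
theorem pvPos_le (ch : Char) :
    ∀ (cs : List Char) (i x : Nat), x ∈ pvPos ch cs i → i ≤ x := by
  intro cs
  induction cs with
  | nil => intro i x hx; simp [pvPos] at hx
  | cons c tl ih =>
    intro i x hx
    by_cases hc : c = ch <;> simp [pvPos, hc] at hx
    · rcases hx with h | h
      · omega
      · have := ih (i + 1) x h; omega
    · have := ih (i + 1) x hx; omega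

-- pvPos produces a strictly increasing list
theorem pvPos_pairwise (ch : Char) :
    ∀ (cs : List Char) (i : Nat), (pvPos ch cs i).Pairwise (· < ·) := by
  intro cs
  induction cs with
  | nil => intro i; simp [pvPos]
  | cons c tl ih =>
    intro i
    by_cases hc : c = ch
    · simp only [pvPos, if_pos hc, List.pairwise_cons]
      exact ⟨fun x hx => lt_of_lt_of_le (Nat.lt_succ_self i) (pvPos_le ch tl (i + 1) x hx),
        ih (i + 1)⟩
    · simpa [pvPos, hc] using ih (i + 1)

-- shifting the start index shifts every produced index
theorem pvPos_succ (ch : Char) :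
    ∀ (cs : List Char) (i : Nat), pvPos ch cs (i + 1) = (pvPos ch cs i).map (· + 1) := by
  intro cs
  induction cs with
  | nil => intro i; simp [pvPos]
  | cons c tl ih =>
    intro i
    by_cases hc : c = ch <;> simp [pvPos, hc, ih]

theorem pvPos_length (ch : Char) :
    ∀ (cs : List Char) (i : Nat), (pvPos ch cs i).length = cs.count ch := by
  intro cs
  induction cs with
  | nil => intro i; simp [pvPos]
  | cons c tl ih =>
    intro i
    by_cases hc : c = ch
    · simp [pvPos, hc, ih]
    · simp only [pvPos, if_neg hc, ih, List.count_cons]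
      have : (ch == c) = false := by
        simp only [beq_eq_false_iff_ne, ne_eq]
        exact fun h => hc h.symm
      simp [hc]

-- on a sorted list the while loop computes the suffix of elements ≥ p
theorem pvAdvance_eq_filter :
    ∀ (tp : List Nat), tp.Pairwise (· < ·) → ∀ (p : Nat),
      pvAdvance tp p = tp.filter (fun q => p ≤ q) := by
  intro tp
  induction tp with
  | nil => intro _ p; simp [pvAdvance]
  | cons q tl ih =>
    intro hp p
    rcases List.pairwise_cons.mp hp with ⟨hq, htl⟩
    by_cases hlt : q < p
    · simp [pvAdvance, hlt, Nat.not_le.mpr hlt, ih htl p]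
    · have hqp : p ≤ q := Nat.not_lt.mp hlt
      have hall : tl.filter (fun q' => p ≤ q') = tl := by
        apply List.filter_eq_self.mpr
        intro x hx
        have := hq x hx
        simp; omega
      simp [pvAdvance, hlt, hqp, hall]

-- the proof-side pure variant of pvGoB: no pointer state, counts over the fixed tp
def pvGoP : List Nat → List Nat → Nat → Int → Int
  | [], _, _, best => best
  | p :: ps, tp, rank, best =>
    pvGoP ps tp (rank + 1) (max best ((rank : Int) * (tp.countP (fun q => p ≤ q) : Int)))

-- pvGoP only looks at tp through the counts at the visited positions
theorem pvGoP_congr :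
    ∀ (ps tp tp' : List Nat) (rank : Nat) (best : Int),
      (∀ p ∈ ps, tp'.countP (fun q => p ≤ q) = tp.countP (fun q => p ≤ q)) →
      pvGoP ps tp' rank best = pvGoP ps tp rank best := by
  intro ps
  induction ps with
  | nil => intro tp tp' rank best _; rfl
  | cons p ps ih =>
    intro tp tp' rank best h
    simp only [pvGoP, h p (by simp)]
    exact ih tp tp' _ _ (fun p' hp' => h p' (by simp [hp']))

-- the two-pointer loop equals the pure variant on sorted inputs
theorem pvGoB_eq_pvGoP :
    ∀ (lp tp : List Nat) (rank : Nat) (best : Int),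
      lp.Pairwise (· < ·) → tp.Pairwise (· < ·) →
      pvGoB lp tp rank best = pvGoP lp tp rank best := by
  intro lp
  induction lp with
  | nil => intro tp rank best _ _; rfl
  | cons p ps ih =>
    intro tp rank best hlp htp
    rcases List.pairwise_cons.mp hlp with ⟨hp, hps⟩
    have hadv := pvAdvance_eq_filter tp htp p
    have htp' : (pvAdvance tp p).Pairwise (· < ·) := by
      rw [hadv]; exact htp.filter _
    have hlen : ((pvAdvance tp p).length : Int) = (tp.countP (fun q => p ≤ q) : Int) := by
      rw [hadv, List.countP_eq_length_filter]
    simp only [pvGoB, pvGoP, hlen]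
    rw [ih (pvAdvance tp p) _ _ hps htp']
    apply pvGoP_congr
    intro p' hp'
    rw [hadv, List.countP_filter]
    apply List.countP_congr
    intro x _
    have hpp' : p < p' := hp p' hp'
    simp; omega

-- pvGoP over index lists shifted by one equals pvGoP over the originals
theorem pvGoP_shift :
    ∀ (lp tp tp' : List Nat) (rank : Nat) (best : Int),
      (∀ p, tp'.countP (fun q => p + 1 ≤ q) = tp.countP (fun q => p ≤ q)) →
      pvGoP (lp.map (· + 1)) tp' rank best = pvGoP lp tp rank best := by
  intro lp
  induction lp with
  | nil => intro tp tp' rank best _; rfl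
  | cons p ps ih =>
    intro tp tp' rank best h
    simp only [List.map_cons, pvGoP, h p]
    exact ih tp tp' _ _ h

theorem pv_count_shift_map (tp : List Nat) (p : Nat) :
    (tp.map (· + 1)).countP (fun q => p + 1 ≤ q) = tp.countP (fun q => p ≤ q) := by
  rw [List.countP_map]
  induction tp with
  | nil => rfl
  | cons q tl ih =>
    rw [List.countP_cons, List.countP_cons, ih]
    have h1 : ((fun q => decide (p + 1 ≤ q)) ∘ (fun x : Nat => x + 1)) q = decide (p ≤ q) := by
      simp only [Function.comp_apply, decide_eq_decide]
      omega
    rw [h1]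

theorem pv_count_shift_cons (tp : List Nat) (p : Nat) :
    ((0 : Nat) :: tp.map (· + 1)).countP (fun q => p + 1 ≤ q) = tp.countP (fun q => p ≤ q) := by
  rw [List.countP_cons, pv_count_shift_map]
  have h0 : (decide (p + 1 ≤ 0)) = false := by simp
  rw [h0]
  simp

-- MAIN: A's streaming scan equals the pure position-list scan
theorem pv_main :
    ∀ (cs : List Char) (r : Nat) (res : Int),
      (r : Int) * ((cs.count 'T' : Nat) : Int) ≤ res →
      pvGoA cs ((cs.count 'T' : Nat) : Int) (r : Int) res
        = pvGoP (pvPos 'L' cs 0) (pvPos 'T' cs 0) (r + 1) res := by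
  intro cs
  induction cs with
  | nil => intro r res _; rfl
  | cons c tl ih =>
    intro r res hres
    by_cases hL : c = 'L'
    · subst hL
      have hT : ('L' : Char) ≠ 'T' := by decide
      have hcount : (('L' :: tl).count 'T' : Int) = (tl.count 'T' : Int) := by
        simp [hT]
      simp only [pvGoA, pvPos, pvPos_succ, pvGoP, hcount, if_neg hT, reduceIte]
      have h0 : ((pvPos 'T' tl 0).map (· + 1)).countP (fun q => 0 ≤ q)
          = tl.count 'T' := by
        rw [List.countP_eq_length.mpr (by intro x _; simp), List.length_map, pvPos_length]
      rw [h0]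
      rw [pvGoP_shift _ (pvPos 'T' tl 0) _ _ _ (pv_count_shift_map _)]
      have : ((r : Int) + 1) = ((r + 1 : Nat) : Int) := by push_cast; ring
      rw [this, ih (r + 1) _ (le_max_right _ _)]
    · by_cases hT : c = 'T'
      · subst hT
        have hcount : (('T' :: tl).count 'T') = tl.count 'T' + 1 := by
          simp
        have hdrop : max res ((r : Int) * ((tl.count 'T' : Nat) : Int)) = res := by
          rw [hcount] at hres
          have : (r : Int) * ((tl.count 'T' : Nat) : Int) ≤ res := by
            push_cast at hres ⊢
            nlinarith [Int.natCast_nonneg r]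
          exact max_eq_left this
        have hct : ((('T' :: tl).count 'T' : Nat) : Int) - 1 = ((tl.count 'T' : Nat) : Int) := by
          rw [hcount]; push_cast; ring
        simp only [pvGoA, pvPos, pvPos_succ, hct, if_neg hL, reduceIte]
        rw [hdrop]
        rw [pvGoP_shift _ (pvPos 'T' tl 0) _ _ _ (pv_count_shift_cons _)]
        apply ih
        rw [hcount] at hres
        push_cast at hres ⊢
        nlinarith [Int.natCast_nonneg r]
      · have hcount : (('T' : Char) = c → False) := fun h => hT h.symm
        have hcnt : (c :: tl).count 'T' = tl.count 'T' := by
          simp [List.count_cons]; intro h; exact hT h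
        simp only [pvGoA, pvPos, pvPos_succ, hcnt, if_neg hT, if_neg hL]
        have hdrop : max res ((r : Int) * ((tl.count 'T' : Nat) : Int)) = res := by
          rw [hcnt] at hres
          exact max_eq_left hres
        rw [hdrop]
        rw [pvGoP_shift _ (pvPos 'T' tl 0) _ _ _ (pv_count_shift_map _)]
        apply ih
        rw [hcnt] at hres
        exact hres

-- ===== VERDICT (by name: the statement is the Claim_ definition above) =====
theorem maxInsertC_spec : Claim_equal_maxInsertC := by
  intro s _
  unfold Spec_maxInsertC maxInsertC maxInsertC_alt
  rw [PySem.Str.count_eq]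
  have hT : (("T" : String).toList) = ['T'] := rfl
  rw [hT, pv_chars_count_singleton]
  rw [pvGoB_eq_pvGoP _ _ _ _ (pvPos_pairwise 'L' s.toList 0) (pvPos_pairwise 'T' s.toList 0)]
  have := pv_main s.toList 0 0 (by simp)
  simpa using this
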